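-- pv_equiv track=rewrite | github.com/OxanaMakhneva/IB | PAB/models/read_write/import_in_BD.py | delete_null_records
-- ===== SOURCE A (Python) =====
-- def delete_null_records(import_data):
--     new_import_data = []
--     import collections
--     from collections import Counter
--     for record in import_data:
--         cnt = collections.Counter(record)
--         if cnt[None] < len(record):
--             new_import_data.append(record)
--         else:
--             pass
--     return new_import_data
-- ===== SOURCE B (Python) =====
-- def delete_null_records(import_data):
--     # Recursive, back-to-front: keep a record iff its set of distinct values
--     # minus {None} is nonempty (i.e. some value other than None occurs).
--     if not import_data:
--         return []
--     head = import_data[0]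
--     rest = delete_null_records(import_data[1:])
--     return [head] + rest if set(head) - {None} else rest
-- ===== Notes on version B (the rewrite author's own statement) =====
-- stated objective: alternative
-- what changed: Replaced the iterative loop with a Counter frequency table by structural recursion that builds the result back-to-front and decides each record via a set difference set(record) - {None} being nonempty.
import Mathlib
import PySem

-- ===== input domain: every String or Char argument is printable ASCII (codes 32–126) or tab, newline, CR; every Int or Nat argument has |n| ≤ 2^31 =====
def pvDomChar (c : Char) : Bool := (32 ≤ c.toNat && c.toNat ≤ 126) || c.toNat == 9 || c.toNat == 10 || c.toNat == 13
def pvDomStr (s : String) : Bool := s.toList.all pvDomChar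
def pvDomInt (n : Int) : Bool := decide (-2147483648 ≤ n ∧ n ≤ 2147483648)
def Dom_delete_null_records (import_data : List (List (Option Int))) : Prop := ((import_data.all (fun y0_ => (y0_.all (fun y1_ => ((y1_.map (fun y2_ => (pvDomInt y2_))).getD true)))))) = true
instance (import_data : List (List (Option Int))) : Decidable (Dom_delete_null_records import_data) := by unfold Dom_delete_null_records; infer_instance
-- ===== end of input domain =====

-- B replaces A's Counter-per-record loop by structural recursion building the result
-- back-to-front, keeping a record iff set(record) - {None} is nonempty (alternative).
-- ===== PORT A =====
def delete_null_records (import_data : List (List (Option Int))) : List (List (Option Int)) :=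
  import_data.foldl (fun new_import_data record =>
    let cnt := PySem.Dict.counter record
    if cnt.getD none 0 < (record.length : Int) then new_import_data ++ [record]
    else new_import_data) []

-- ===== PORT B =====
def delete_null_records_alt : List (List (Option Int)) → List (List (Option Int))
  | [] => []
  | head :: tl =>
    let rest := delete_null_records_alt tl
    if PySem.Set.diff (PySem.Set.ofList head) [none] ≠ [] then head :: rest else rest

-- ===== PRECONDITION & SPEC =====
def Spec_delete_null_records (import_data : List (List (Option Int))) (out : List (List (Option Int))) : Prop := out = delete_null_records_alt import_data
instance (import_data : List (List (Option Int))) (out : List (List (Option Int))) : Decidable (Spec_delete_null_records import_data out) := by unfold Spec_delete_null_records; infer_instance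

-- ===== CLAIM (what is proved, stated in full; the proofs are below) =====
def Claim_equal_delete_null_records : Prop := ∀ (import_data : List (List (Option Int))), Dom_delete_null_records import_data → Spec_delete_null_records import_data (delete_null_records import_data)

-- ===== LEMMAS AND PROOFS =====

-- A's keep test: the None count is below the length iff some element is non-None.
lemma count_none_lt_iff_any (record : List (Option Int)) :
    ((PySem.Dict.counter record).getD none 0 < (record.length : Int)) ↔
      record.any (fun x => x.isSome) = true := by
  rw [PySem.Dict.getD_counter]
  induction record with
  | nil => simp
  | cons a l ih =>
    have h := List.count_le_length (l := l) (a := (none : Option Int))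
    cases a <;> simp [ih] <;> omega

-- B's keep test: set(record) - {None} is nonempty iff some element is non-None.
lemma diff_ne_nil_iff_any (record : List (Option Int)) :
    (PySem.Set.diff (PySem.Set.ofList record) [none] ≠ []) ↔
      record.any (fun x => x.isSome) = true := by
  constructor
  · intro h
    rcases List.exists_mem_of_ne_nil _ h with ⟨y, hy⟩
    rw [PySem.Set.mem_diff, PySem.Set.mem_ofList] at hy
    rcases hy with ⟨hy1, hy2⟩
    simp only [List.any_eq_true]
    exact ⟨y, hy1, by cases y <;> simp_all⟩
  · intro h hnil
    rcases List.any_eq_true.mp h with ⟨y, hy, hsome⟩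
    have : y ∈ PySem.Set.diff (PySem.Set.ofList record) [none] := by
      rw [PySem.Set.mem_diff, PySem.Set.mem_ofList]
      exact ⟨hy, by cases y <;> simp_all⟩
    simp [hnil] at this

-- B computes the filter by the same keep predicate.
lemma alt_eq_filter (l : List (List (Option Int))) :
    delete_null_records_alt l = l.filter (fun record => record.any (fun x => x.isSome)) := by
  induction l with
  | nil => rfl
  | cons h t ih =>
    simp only [delete_null_records_alt, ih, List.filter_cons]
    by_cases hc : (h.any (fun x => x.isSome)) = true
    · rw [if_pos ((diff_ne_nil_iff_any h).mpr hc)]; simp [hc]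
    · rw [if_neg (fun hne => hc ((diff_ne_nil_iff_any h).mp hne))]
      simp [hc]

-- ===== VERDICT (by name: the statement is the Claim_ definition above) =====
theorem delete_null_records_spec : Claim_equal_delete_null_records := by
  intro import_data _
  unfold Spec_delete_null_records delete_null_records
  rw [PySem.List.foldl_append_ite_eq_filter, alt_eq_filter]
  simp only [List.nil_append]
  exact List.filter_congr (fun r _ => by
    simp only [count_none_lt_iff_any, Bool.decide_eq_true])
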